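-- pv_equiv track=rewrite | github.com/joestalker1/leetcode | src/main/scala/TotalAppealOfAString.py | appealSum
-- ===== SOURCE A (Python) =====
-- def appealSum(s: str) -> int:
--     if not s:
--         return 0
--     cur_num = 0
--     show_last_pos = [0] * 27
--     res = 0
--     for i in range(len(s)):
--         code = ord(s[i]) - ord('a')
--         #add char to all string between previous char and current and number distinct chars are i - show_last_pos[code] + 1
--         cur_num += i - show_last_pos[code] + 1
--         show_last_pos[code] = i + 1
--         res += cur_num
--     return res
-- ===== SOURCE B (Python) =====
-- def appealSum(s: str) -> int:
--     n = len(s)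
--     res = 0
--     last = [-1] * 27
--     for i, ch in enumerate(s):
--         code = ord(ch) - ord('a')
--         res += (i - last[code]) * (n - i)
--         last[code] = i
--     return res
-- ===== Notes on version B (the rewrite author's own statement) =====
-- stated objective: alternative
-- what changed: B drops A's running distinct-count accumulator (cur_num, summed into res at every ending position) and instead adds each character occurrence's independent contribution (i - last) * (n - i) in one pass over enumerate(s), storing the previous index itself (default -1) in the same 27-slot table indexed by the character's code offset from lowercase a.
import Mathlib
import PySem

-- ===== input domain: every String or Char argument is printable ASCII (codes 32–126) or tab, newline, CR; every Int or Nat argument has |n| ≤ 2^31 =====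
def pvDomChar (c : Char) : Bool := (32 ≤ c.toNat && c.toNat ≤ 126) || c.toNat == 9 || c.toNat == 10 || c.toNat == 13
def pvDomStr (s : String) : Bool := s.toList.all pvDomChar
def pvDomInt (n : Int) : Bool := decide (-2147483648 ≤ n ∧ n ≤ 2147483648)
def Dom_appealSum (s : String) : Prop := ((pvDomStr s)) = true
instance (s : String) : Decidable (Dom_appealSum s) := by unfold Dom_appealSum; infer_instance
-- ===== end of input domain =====

-- B drops A's running distinct-count accumulator (cur_num) and instead adds each character
-- occurrence's independent contribution (i - last) * (n - i) directly (objective: alternative).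


-- ===== PORT A =====
-- body of A's 'for i in range(len(s))' loop; state = (cur_num, show_last_pos, res); c = s[i]
def stepA (st : Int × List Int × Int) (i : Int) (c : Char) : Int × List Int × Int :=
  let code : Int := (c.toNat : Int) - 97
  let cur : Int := st.1 + i - PySem.List.pyGetD st.2.1 code 0 + 1
  (cur, PySem.List.pySetD st.2.1 code (i + 1), st.2.2 + cur)

def appealSum (s : String) : Int :=
  if s.toList = [] then 0
  else
    ((PySem.List.pyRange 0 (s.toList.length : Int) 1).foldl
      (fun st i => stepA st i (PySem.List.pyGetD s.toList i ' '))
      (0, List.replicate 27 (0 : Int), 0)).2.2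

-- ===== PORT B =====
-- body of B's 'for i, ch in enumerate(s)' loop; state = (res, last); p = (i, ch)
def stepB (n : Int) (st : Int × List Int) (p : Int × Char) : Int × List Int :=
  let code : Int := (p.2.toNat : Int) - 97
  (st.1 + (p.1 - PySem.List.pyGetD st.2 code (-1)) * (n - p.1),
   PySem.List.pySetD st.2 code p.1)

def appealSum_alt (s : String) : Int :=
  ((PySem.List.enumerate s.toList 0).foldl (stepB (s.toList.length : Int))
    (0, List.replicate 27 (-1 : Int))).1

-- ===== PRECONDITION & SPEC =====
-- Pre_ excludes exactly the inputs on which both Pythons raise IndexError: a character whose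
-- code offset from lowercase a falls outside [-27, 26], the indices a 27-slot table accepts.
def Pre_appealSum (s : String) : Prop :=
  (s.toList.all (fun c => 70 ≤ c.toNat && c.toNat ≤ 123)) = true
instance (s : String) : Decidable (Pre_appealSum s) := by unfold Pre_appealSum; infer_instance
def pvWitness_appealSum : String := "abc"

def Spec_appealSum (s : String) (out : Int) : Prop := out = appealSum_alt s
instance (s : String) (out : Int) : Decidable (Spec_appealSum s out) := by unfold Spec_appealSum; infer_instance

-- ===== CLAIM (what is proved, stated in full; the proofs are below) =====
def Claim_equal_appealSum : Prop := ∀ (s : String), Dom_appealSum s → Pre_appealSum s → Spec_appealSum s (appealSum s)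

-- ===== LEMMAS AND PROOFS =====

-- setting through a map commutes (both sides clamp out-of-range indices the same way)
lemma pySetD_map (f : Int → Int) (xs : List Int) (i : Int) (v : Int) :
    PySem.List.pySetD (xs.map f) i (f v) = (PySem.List.pySetD xs i v).map f := by
  unfold PySem.List.pySetD PySem.List.pySet? PySem.List.pyIdx?
  simp only [List.length_map]
  split_ifs <;> simp [List.map_set]

-- fold over range(len) indexing into the list = fold over its enumeration
lemma foldl_pyRange_enum {β : Type} (f : β → Int → Char → β) (dflt : Char) :
    ∀ (t pre : List Char) (b : β),
    (PySem.List.pyRange (pre.length : Int) ((pre.length : Int) + (t.length : Int)) 1).foldl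
        (fun st i => f st i (PySem.List.pyGetD (pre ++ t) i dflt)) b
      = (PySem.List.enumerate t (pre.length : Int)).foldl (fun st p => f st p.1 p.2) b := by
  intro t
  induction t with
  | nil =>
    intro pre b
    rw [PySem.List.pyRange_one_eq_nil (by simp)]
    simp [PySem.List.enumerate]
  | cons c t' ih =>
    intro pre b
    rw [PySem.List.pyRange_one_cons (by push_cast [List.length_cons]; omega)]
    rw [PySem.List.enumerate_cons]
    simp only [List.foldl_cons]
    have hget : PySem.List.pyGetD (pre ++ c :: t') (pre.length : Int) dflt = c := by
      rw [PySem.List.pyGetD_natCast]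
      rw [List.getD_eq_getElem?_getD]
      rw [List.getElem?_append_right (le_refl _)]
      simp
    rw [hget]
    have h1 : pre ++ c :: t' = (pre ++ [c]) ++ t' := by simp
    have h2 : ((pre.length : Int) + 1) = (((pre ++ [c]).length : Int)) := by simp
    have h3 : ((pre.length : Int) + ((c :: t').length : Int)) = (((pre ++ [c]).length : Int) + (t'.length : Int)) := by
      simp only [List.length_append, List.length_cons, List.length_nil]; push_cast; omega
    rw [h1, h2, h3]
    exact ih (pre ++ [c]) _

-- simultaneous loop invariant: A's table holds B's table shifted by one
-- (A stores prev_index + 1 with default 0, B stores prev_index with default -1),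
-- and A's res lags B's by (n - k) * cur_num
lemma main_inv (n : Int) :
    ∀ (t : List Char) (k : Int) (slotsB : List Int) (curA resA resB : Int),
    n = k + t.length →
    resA = resB - (n - k) * curA →
    ((PySem.List.enumerate t k).foldl (fun st p => stepA st p.1 p.2)
        (curA, slotsB.map (· + 1), resA)).2.2
      = ((PySem.List.enumerate t k).foldl (stepB n) (resB, slotsB)).1 := by
  intro t
  induction t with
  | nil =>
    intro k slotsB curA resA resB hn hres
    simp only [List.length_nil, Nat.cast_zero, add_zero] at hn
    subst hn
    simp only [PySem.List.enumerate_nil, List.foldl_nil]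
    simpa using hres
  | cons c t' ih =>
    intro k slotsB curA resA resB hn hres
    rw [PySem.List.enumerate_cons]
    simp only [List.foldl_cons]
    simp only [stepA, stepB]
    have hzero : (0 : Int) = (-1) + 1 := by norm_num
    rw [hzero, PySem.List.pyGetD_map (· + 1) slotsB ((c.toNat : Int) - 97) (-1)]
    have hset : PySem.List.pySetD (slotsB.map (· + 1)) ((c.toNat : Int) - 97) (k + 1)
        = (PySem.List.pySetD slotsB ((c.toNat : Int) - 97) k).map (· + 1) :=
      pySetD_map (· + 1) slotsB _ k
    rw [hset]
    refine ih (k + 1) _ _ _ _ ?_ ?_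
    · simp only [List.length_cons] at hn; push_cast at hn ⊢; omega
    · ring_nf
      ring_nf at hres
      linarith [hres]

-- ===== VERDICT (by name: the statement is the Claim_ definition above) =====
theorem appealSum_spec : Claim_equal_appealSum := by
  intro s _ _
  unfold Spec_appealSum appealSum appealSum_alt
  by_cases h : s.toList = []
  · rw [if_pos h, h]
    simp [PySem.List.enumerate_nil]
  · rw [if_neg h]
    have hb := foldl_pyRange_enum (fun st i c => stepA st i c) ' ' s.toList []
      ((0 : Int), List.replicate 27 (0 : Int), (0 : Int))
    simp only [List.length_nil, Nat.cast_zero, zero_add, List.nil_append] at hb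
    rw [hb]
    have hrep : List.replicate 27 (0 : Int) = (List.replicate 27 (-1 : Int)).map (· + 1) := by
      simp [List.map_replicate]
    rw [hrep]
    refine main_inv (s.toList.length : Int) s.toList 0 _ _ _ _ ?_ ?_
    · simp
    · ring
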